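-- pv_equiv track=rewrite | github.com/dannyxn/Graphs-Toolbox | algorithms/center_node.py | center_node_minimax
-- ===== SOURCE A (Python) =====
-- def center_node_minimax(weights_matrix: list) -> list:
--     center = 0
--     for row in range(len(weights_matrix)):
--         if max(weights_matrix[row]) < max(weights_matrix[center]):
--             center = row
--     min = max(weights_matrix[center])
--     result = []
--     for row in range(len(weights_matrix)):
--         if max(weights_matrix[row]) == min:
--             result.append(row)
--     return result
-- ===== SOURCE B (Python) =====
-- def center_node_minimax(weights_matrix: list) -> list:
--     # single online pass: running minimum of row maxima with a reset-on-improve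
--     # index accumulator; the row max itself is computed by a hand-rolled scan.
--     best = None
--     result = []
--     for i, row in enumerate(weights_matrix):
--         m = row[0]
--         for x in row:
--             if x > m:
--                 m = x
--         if best is None or m < best:
--             best = m
--             result = [i]
--         elif m == best:
--             result.append(i)
--     return result
-- ===== Notes on version B (the rewrite author's own statement) =====
-- stated objective: alternative
-- what changed: B makes ONE online pass with a reset-on-improve accumulator: it keeps the best row-max so far and a list of matching indices, resetting the list when a strictly smaller row-max appears and appending on ties, with the row max itself computed by a hand-rolled scan; A makes two staged index passes, first an argmin loop that recomputes max(row) on every comparison and then a separate collection loop.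
-- outside the precondition, e.g. on center_node_minimax([]): A raises IndexError, B returns []
import Mathlib
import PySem

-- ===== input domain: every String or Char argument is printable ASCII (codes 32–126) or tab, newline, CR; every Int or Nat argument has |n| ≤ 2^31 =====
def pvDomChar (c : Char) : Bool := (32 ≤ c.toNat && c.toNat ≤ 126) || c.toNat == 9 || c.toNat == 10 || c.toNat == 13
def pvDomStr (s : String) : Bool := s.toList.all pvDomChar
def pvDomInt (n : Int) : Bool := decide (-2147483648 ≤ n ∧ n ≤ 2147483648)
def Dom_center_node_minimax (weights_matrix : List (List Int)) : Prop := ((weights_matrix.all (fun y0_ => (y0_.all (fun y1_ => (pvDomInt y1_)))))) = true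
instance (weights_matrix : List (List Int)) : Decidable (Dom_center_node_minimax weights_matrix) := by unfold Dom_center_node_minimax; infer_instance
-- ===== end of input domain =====

-- B replaces A's two staged index passes (an argmin loop recomputing max(row) at every
-- comparison, then a collection loop) by ONE online pass keeping the best row-max so far
-- and a reset-on-improve index accumulator, with the row max hand-rolled (objective: alternative).

-- Python max(xs) for a list of ints; raises (→ default never used under Pre_) on [].
def pymax (xs : List Int) : Int := (PySem.List.max? xs (fun y => y)).getD 0

-- ===== PORT A =====
def center_node_minimax (weights_matrix : List (List Int)) : List Int :=
  let center : Int :=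
    (PySem.List.pyRange 0 (weights_matrix.length : Int)).foldl
      (fun center row =>
        if pymax (PySem.List.pyGetD weights_matrix row []) <
            pymax (PySem.List.pyGetD weights_matrix center []) then row else center) 0
  let mn := pymax (PySem.List.pyGetD weights_matrix center [])
  (PySem.List.pyRange 0 (weights_matrix.length : Int)).foldl
    (fun result row =>
      if pymax (PySem.List.pyGetD weights_matrix row []) = mn then result ++ [row] else result) []

-- ===== PORT B =====
-- B's hand-rolled row max: 'm = row[0]; for x in row: if x > m: m = x'
def rowRunMax (row : List Int) : Int :=
  row.foldl (fun m x => if x > m then x else m) (PySem.List.pyGetD row 0 0)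

def center_node_minimax_alt (weights_matrix : List (List Int)) : List Int :=
  let st :=
    (PySem.List.enumerate weights_matrix).foldl
      (fun (st : Option Int × List Int) p =>
        let m := rowRunMax p.2
        match st.1 with
        | none => (some m, [p.1])
        | some b =>
          if m < b then (some m, [p.1])
          else if m = b then (some b, st.2 ++ [p.1])
          else st)
      (none, [])
  st.2

-- ===== PRECONDITION & SPEC =====
-- Pre_ excludes exactly the inputs where the Python A raises: an empty matrix
-- (IndexError) and any empty row (ValueError from max([])).
def Pre_center_node_minimax (weights_matrix : List (List Int)) : Prop :=
  weights_matrix ≠ [] ∧ ∀ row ∈ weights_matrix, row ≠ []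
instance (weights_matrix : List (List Int)) : Decidable (Pre_center_node_minimax weights_matrix) := by unfold Pre_center_node_minimax; infer_instance

def pvWitness_center_node_minimax : List (List Int) := [[1, 3], [2]]

def Spec_center_node_minimax (weights_matrix : List (List Int)) (out : List Int) : Prop := out = center_node_minimax_alt weights_matrix
instance (weights_matrix : List (List Int)) (out : List Int) : Decidable (Spec_center_node_minimax weights_matrix out) := by unfold Spec_center_node_minimax; infer_instance

-- ===== CLAIM (what is proved, stated in full; the proofs are below) =====
def Claim_equal_center_node_minimax : Prop := ∀ (weights_matrix : List (List Int)), Dom_center_node_minimax weights_matrix → Pre_center_node_minimax weights_matrix → Spec_center_node_minimax weights_matrix (center_node_minimax weights_matrix)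

-- ===== LEMMAS AND PROOFS =====

-- canonical form both ports are reduced to: indices of the maxes table holding its minimum
def canon (weights_matrix : List (List Int)) : List Int :=
  ((PySem.List.enumerate (weights_matrix.map pymax)).filter
      (fun p => p.2 ==
        (weights_matrix.map pymax).foldl (fun best v => if v < best then v else best)
          (PySem.List.pyGetD (weights_matrix.map pymax) 0 0))).map (fun p => p.1)

-- a row-max looked up through the maxes table is the max of the looked-up row
lemma pygetd_map_pymax (m : List (List Int)) (i : Int) :
    pymax (PySem.List.pyGetD m i []) = PySem.List.pyGetD (m.map pymax) i 0 :=
  (PySem.List.pyGetD_map pymax m i []).symm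

-- a running 'if v < best then v else best' is a running min
lemma minfold_eq (t : List Int) (a : Int) :
    t.foldl (fun b v => if v < b then v else b) a = t.foldl min a :=
  PySem.List.foldl_congr_mem t _ _ a (by
    intro acc x _
    rw [min_def]; split_ifs <;> omega)

-- invariant of A's first loop: after scanning indices 0..k, the table value at
-- the kept index is the minimum of the first k+1 table entries
lemma loopA_val (t0 : Int) (tt : List Int) (k : Nat) (hk : k ≤ tt.length) :
    PySem.List.pyGetD (t0 :: tt)
      ((PySem.List.pyRange 0 ((k : Int) + 1)).foldl
        (fun c r => if PySem.List.pyGetD (t0 :: tt) r 0 < PySem.List.pyGetD (t0 :: tt) c 0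
                    then r else c) 0) 0
      = (tt.take k).foldl min t0 := by
  induction k with
  | zero =>
      rw [show ((0 : Nat) : Int) + 1 = 0 + 1 by norm_num, PySem.List.pyRange_one_singleton]
      simp
  | succ k ih =>
      have hk' : k ≤ tt.length := Nat.le_of_succ_le hk
      have hklt : k < tt.length := hk
      rw [show ((k + 1 : Nat) : Int) + 1 = ((k : Int) + 1) + 1 by push_cast; ring,
        PySem.List.pyRange_one_succ_right (by omega), List.foldl_append]
      simp only [List.foldl_cons, List.foldl_nil]
      have hidx : PySem.List.pyGetD (t0 :: tt) ((k : Int) + 1) 0 = tt[k] := by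
        rw [show ((k : Int) + 1) = ((k + 1 : Nat) : Int) by push_cast; ring,
          PySem.List.pyGetD_natCast]
        simp [List.getD_eq_getElem?_getD, hklt]
      have htake : tt.take (k + 1) = tt.take k ++ [tt[k]] := by
        rw [List.take_add_one]; simp [hklt]
      rw [htake, List.foldl_append]
      simp only [List.foldl_cons, List.foldl_nil]
      split_ifs with h
      · rw [hidx] at h ⊢
        rw [ih hk'] at h
        omega
      · rw [hidx] at h
        rw [ih hk'] at h ⊢
        omega

-- A equals the canonical form on Pre_
lemma A_eq_canon (m : List (List Int)) (hpre : Pre_center_node_minimax m) :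
    center_node_minimax m = canon m := by
  obtain ⟨hne, _hrows⟩ := hpre
  unfold center_node_minimax canon
  obtain ⟨r0, rs, rfl⟩ : ∃ r0 rs, m = r0 :: rs := by
    cases m with
    | nil => exact absurd rfl hne
    | cons a l => exact ⟨a, l, rfl⟩
  set t0 := pymax r0 with ht0
  set tt := rs.map pymax with htt
  have hmap : (r0 :: rs).map pymax = t0 :: tt := rfl
  simp only [pygetd_map_pymax, hmap]
  have hbest :
      (t0 :: tt).foldl (fun best v => if v < best then v else best)
        (PySem.List.pyGetD (t0 :: tt) 0 0) = tt.foldl min t0 := by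
    rw [minfold_eq, PySem.List.pyGetD_ofNat']
    simp [List.getD]
  have hlen : (r0 :: rs).length = tt.length + 1 := by simp [htt]
  have hmn :
      PySem.List.pyGetD (t0 :: tt)
        ((PySem.List.pyRange 0 ((r0 :: rs).length : Int)).foldl
          (fun c r => if PySem.List.pyGetD (t0 :: tt) r 0 < PySem.List.pyGetD (t0 :: tt) c 0
                      then r else c) 0) 0 = tt.foldl min t0 := by
    rw [show (((r0 :: rs).length : Int)) = ((tt.length : Int) + 1) by rw [hlen]; push_cast; ring]
    simpa using loopA_val t0 tt tt.length le_rfl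
  rw [hbest, hmn]
  rw [PySem.List.foldl_append_ite_eq_filter
        (fun r => PySem.List.pyGetD (t0 :: tt) r 0 = tt.foldl min t0)]
  rw [PySem.List.enumerate_eq_map_pyRange (t0 :: tt) 0, List.filter_map, List.map_map]
  simp only [PySem.List.len_eq]
  have hlen2 : ((t0 :: tt).length : Int) = ((r0 :: rs).length : Int) := by
    simp [htt]
  rw [hlen2]
  simp only [Function.comp_def, List.map_id']
  refine (List.filter_congr fun x _ => ?_).symm
  show (PySem.List.pyGetD (t0 :: tt) x 0 == tt.foldl min t0) = _
  by_cases h : PySem.List.pyGetD (t0 :: tt) x 0 = tt.foldl min t0 <;> simp [h]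

-- B's hand-rolled scan is Python's max on a nonempty row
lemma rowRunMax_eq_pymax (r : List Int) (hr : r ≠ []) : rowRunMax r = pymax r := by
  obtain ⟨x, t, rfl⟩ : ∃ x t, r = x :: t := by
    cases r with
    | nil => exact absurd rfl hr
    | cons a l => exact ⟨a, l, rfl⟩
  unfold rowRunMax pymax
  rw [PySem.List.max?_id_cons]
  have hfun : (fun (m x : Int) => if x > m then x else m) = max := by
    funext m x
    rw [max_def]; split_ifs <;> omega
  rw [PySem.List.pyGetD_ofNat']
  simp only [List.getD, List.getElem?_cons_zero, Option.getD_some, List.foldl_cons, hfun,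
    Option.getD_some]
  rw [show max x x = x by simp]

-- the running minimum never exceeds its seed
lemma foldl_min_le_seed (l : List Int) (b : Int) : l.foldl min b ≤ b := by
  induction l generalizing b with
  | nil => simp
  | cons x t ih => exact le_trans (ih (min b x)) (min_le_left b x)

-- B's one-pass step function
def bstep (st : Option Int × List Int) (p : Int × List Int) : Option Int × List Int :=
  let m := rowRunMax p.2
  match st.1 with
  | none => (some m, [p.1])
  | some b =>
    if m < b then (some m, [p.1])
    else if m = b then (some b, st.2 ++ [p.1])
    else st

-- invariant of B's single pass from a 'some' state: the final best is the running min of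
-- the row maxima, and the index list is reset at each strict improvement
lemma loopB_inv (l : List (List Int)) (i b : Int) (res : List Int) :
    (PySem.List.enumerate l i).foldl bstep (some b, res) =
      (some ((l.map rowRunMax).foldl min b),
       (if (l.map rowRunMax).foldl min b = b then res else []) ++
         ((PySem.List.enumerate (l.map rowRunMax) i).filter
           (fun p => p.2 == (l.map rowRunMax).foldl min b)).map (fun p => p.1)) := by
  induction l generalizing i b res with
  | nil => simp [PySem.List.enumerate_nil]
  | cons r t ih =>
      rw [PySem.List.enumerate_cons, List.foldl_cons]
      set m := rowRunMax r with hm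
      have hmap : (r :: t).map rowRunMax = m :: t.map rowRunMax := rfl
      rw [hmap, PySem.List.enumerate_cons]
      simp only [List.foldl_cons]
      have hB' : ∀ c : Int, (t.map rowRunMax).foldl min c ≤ c := fun c => foldl_min_le_seed _ c
      by_cases h1 : m < b
      · have hstep : bstep (some b, res) (i, r) = (some m, [i]) := by
          simp [bstep, ← hm, h1]
        rw [hstep, ih (i + 1) m [i]]
        have hbm : min b m = m := by omega
        simp only [hbm]
        have hle : (t.map rowRunMax).foldl min m ≤ m := hB' m
        have hne : (t.map rowRunMax).foldl min m ≠ b := by omega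
        rw [if_neg hne]
        by_cases h2 : (t.map rowRunMax).foldl min m = m
        · rw [if_pos h2, List.filter_cons]
          have : (m == (t.map rowRunMax).foldl min m) = true := by simp [h2]
          simp only [this, if_pos, List.map_cons]
          simp
        · rw [if_neg h2, List.filter_cons]
          have : (m == (t.map rowRunMax).foldl min m) = false := by
            simp; omega
          simp only [this]
          simp
      · by_cases h2 : m = b
        · have hstep : bstep (some b, res) (i, r) = (some b, res ++ [i]) := by
            simp [bstep, ← hm, h2]
          rw [hstep, ih (i + 1) b (res ++ [i])]
          have hbm : min b m = b := by omega
          simp only [hbm]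
          by_cases h3 : (t.map rowRunMax).foldl min b = b
          · rw [if_pos h3, if_pos h3, List.filter_cons]
            have : (m == (t.map rowRunMax).foldl min b) = true := by simp [h3, h2]
            simp only [this, if_pos, List.map_cons]
            simp
          · rw [if_neg h3, if_neg h3, List.filter_cons]
            have : (m == (t.map rowRunMax).foldl min b) = false := by
              have := hB' b
              simp; omega
            simp only [this]
            simp
        · have hstep : bstep (some b, res) (i, r) = (some b, res) := by
            simp [bstep, ← hm, h1, h2]
          rw [hstep, ih (i + 1) b res]
          have hbm : min b m = b := by omega
          simp only [hbm]; rw [List.filter_cons]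
          have : (m == (t.map rowRunMax).foldl min b) = false := by
            have := hB' b
            simp; omega
          simp only [this]
          simp
  
-- B equals the canonical form on Pre_
lemma B_eq_canon (m : List (List Int)) (hpre : Pre_center_node_minimax m) :
    center_node_minimax_alt m = canon m := by
  obtain ⟨hne, hrows⟩ := hpre
  obtain ⟨r0, rs, rfl⟩ : ∃ r0 rs, m = r0 :: rs := by
    cases m with
    | nil => exact absurd rfl hne
    | cons a l => exact ⟨a, l, rfl⟩
  unfold center_node_minimax_alt canon
  have hmaxes : (r0 :: rs).map rowRunMax = (r0 :: rs).map pymax := by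
    apply List.map_congr_left
    intro r hr
    exact rowRunMax_eq_pymax r (hrows r hr)
  set t0 := pymax r0 with ht0
  set tt := rs.map pymax with htt
  have ht0' : rowRunMax r0 = t0 := rowRunMax_eq_pymax r0 (hrows r0 (by simp))
  have htt' : rs.map rowRunMax = tt := by
    have := hmaxes
    simp only [List.map_cons] at this
    exact (List.cons.injEq _ _ _ _ ▸ this).2
  have hmapP : (r0 :: rs).map pymax = t0 :: tt := rfl
  -- reduce B's fold using the one-pass invariant
  rw [PySem.List.enumerate_cons, List.foldl_cons]
  show ((PySem.List.enumerate rs (0 + 1)).foldl bstep (bstep (none, []) (0, r0))).2 = _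
  have hfirst : bstep (none, []) (0, r0) = (some t0, [(0 : Int)]) := by
    simp [bstep, ht0']
  rw [hfirst, loopB_inv rs (0 + 1) t0 [(0 : Int)], htt']
  -- reduce canon's best
  have hbest :
      (t0 :: tt).foldl (fun best v => if v < best then v else best)
        (PySem.List.pyGetD (t0 :: tt) 0 0) = tt.foldl min t0 := by
    rw [minfold_eq, PySem.List.pyGetD_ofNat']
    simp [List.getD]
  rw [hmapP, hbest]
  rw [PySem.List.enumerate_cons, List.filter_cons]
  by_cases h : t0 = tt.foldl min t0
  · have hb : (t0 == tt.foldl min t0) = true := by simp [← h]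
    simp only [hb, if_pos, List.map_cons]
    rw [if_pos h.symm]
    simp
  · have hb : (t0 == tt.foldl min t0) = false := by simp; omega
    simp only [hb]
    rw [if_neg (fun hh => h hh.symm)]
    simp

-- ===== VERDICT (by name: the statement is the Claim_ definition above) =====
theorem center_node_minimax_spec : Claim_equal_center_node_minimax := by
  intro m _hdom hpre
  unfold Spec_center_node_minimax
  rw [A_eq_canon m hpre, B_eq_canon m hpre]
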